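-- pv_equiv track=rewrite | github.com/lbliii/patitas | src/patitas/parsing/inline/links.py | _skip_html_tag
-- ===== SOURCE A (Python) =====
-- def _skip_html_tag(text: str, pos: int) -> int:
--     """Skip over an HTML tag starting at pos.
--
--     Handles open tags, close tags, and self-closing tags.
--     Properly handles quoted attribute values that may contain special chars.
--
--     Args:
--         text: Full text to search
--         pos: Position at the opening <
--
--     Returns:
--         Position after the closing > or pos if not a valid tag
--
--     """
--     text_len = len(text)
--     if pos >= text_len or text[pos] != "<":
--         return pos
--
--     # Skip the opening <
--     p = pos + 1
--
--     # Check for closing tag </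
--     if p < text_len and text[p] == "/":
--         p += 1
--
--     # Must have at least one letter for tag name
--     if p >= text_len or not text[p].isalpha():
--         return pos
--
--     # Skip tag name
--     while p < text_len and (text[p].isalnum() or text[p] in "-_:"):
--         p += 1
--
--     # Now we're in the attribute section - look for >
--     # But we need to respect quoted values
--     while p < text_len:
--         c = text[p]
--
--         if c == ">":
--             return p + 1
--
--         if c == '"':
--             # Double-quoted attribute value - find closing "
--             p += 1
--             while p < text_len and text[p] != '"':
--                 p += 1
--             if p < text_len:
--                 p += 1  # Skip closing "
--             continue
--
--         if c == "'":
--             # Single-quoted attribute value - find closing '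
--             p += 1
--             while p < text_len and text[p] != "'":
--                 p += 1
--             if p < text_len:
--                 p += 1  # Skip closing '
--             continue
--
--         if c == "\n":
--             # Newline in tag is OK, continue
--             p += 1
--             continue
--
--         p += 1
--
--     # No closing > found
--     return pos
-- ===== SOURCE B (Python) =====
-- def _skip_html_tag(text: str, pos: int) -> int:
--     """Skip over an HTML tag starting at pos (single-pass DFA re-implementation)."""
--     n = len(text)
--     # states: 0 expect '<'; 1 expect '/' or name start; 2 expect name start;
--     #         3 in tag name; 4 attribute section; 5 in "..."; 6 in '...'
--     state = 0
--     p = pos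
--     while p < n:
--         c = text[p]
--         if state == 0:
--             if c != "<":
--                 return pos
--             state = 1
--         elif state == 1:
--             if c == "/":
--                 state = 2
--             elif c.isalpha():
--                 state = 3
--             else:
--                 return pos
--         elif state == 2:
--             if c.isalpha():
--                 state = 3
--             else:
--                 return pos
--         else:
--             if state == 3:
--                 if c.isalnum() or c in "-_:":
--                     p += 1
--                     continue
--                 state = 4  # this char belongs to the attribute section: fall through
--             if state == 4:
--                 if c == ">":
--                     return p + 1
--                 if c == '"':
--                     state = 5
--                 elif c == "'":
--                     state = 6
--             elif state == 5:
--                 if c == '"':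
--                     state = 4
--             else:
--                 if c == "'":
--                     state = 4
--         p += 1
--     return pos
-- ===== Notes on version B (the rewrite author's own statement) =====
-- stated objective: alternative
-- what changed: Replaced A's nested loops (separate inner while-loops for double- and single-quoted attribute values, plus separate prefix checks) with a single flat while loop driving a 7-state DFA (expect '<', expect '/'/name, expect name, in name, attributes, in double quote, in single quote) over one position variable.
import Mathlib
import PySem

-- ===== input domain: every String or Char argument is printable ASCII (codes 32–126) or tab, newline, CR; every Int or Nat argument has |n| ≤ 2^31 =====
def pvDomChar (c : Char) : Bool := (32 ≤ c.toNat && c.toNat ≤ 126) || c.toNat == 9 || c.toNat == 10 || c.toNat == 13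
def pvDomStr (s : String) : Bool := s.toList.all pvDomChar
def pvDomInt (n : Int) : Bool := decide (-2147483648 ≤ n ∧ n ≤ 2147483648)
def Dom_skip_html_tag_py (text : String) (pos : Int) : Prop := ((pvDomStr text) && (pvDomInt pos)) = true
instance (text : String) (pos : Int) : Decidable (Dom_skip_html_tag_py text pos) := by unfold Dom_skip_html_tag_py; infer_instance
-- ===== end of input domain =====

-- B replaces A's nested quote-skipping loops by one single-pass DFA over the whole tag
-- (states: expect '<' / expect '/'/name / expect name / name / attributes / in "…" / in '…');
-- objective: alternative decomposition, same O(n) cost. Return-value equivalence only; neither mutates.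
-- Every while loop is transcribed as structural recursion on a fuel argument that only guards
-- totality: it is always called with fuel ≥ the number of remaining iterations, so it never runs out.

-- ===== PORT A =====
-- text[p] with Python's negative-index wraparound; the default is never read inside Pre_.
def pvGetCh (cs : List Char) (p : Int) : Char := (PySem.List.pyGet? cs p).getD ' '

-- A's inner while loop: advance until the closing quote q or the end of text
def pvAQuote (cs : List Char) (n : Int) (q : Char) : Nat → Int → Int
  | 0, p => p
  | fuel + 1, p =>
    if p < n then
      if pvGetCh cs p = q then p else pvAQuote cs n q fuel (p + 1)
    else p

-- A's tag-name while loop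
def pvAName (cs : List Char) (n : Int) : Nat → Int → Int
  | 0, p => p
  | fuel + 1, p =>
    if p < n then
      if PySem.Chars.isalnum (pvGetCh cs p) || pvGetCh cs p = '-' || pvGetCh cs p = '_'
          || pvGetCh cs p = ':' then
        pvAName cs n fuel (p + 1)
      else p
    else p

-- A's attribute-section while loop; some r = "return r", none = fell off the end
def pvAAttr (cs : List Char) (n : Int) : Nat → Int → Option Int
  | 0, _ => none
  | fuel + 1, p =>
    if p < n then
      let c := pvGetCh cs p
      if c = '>' then some (p + 1)
      else if c = '"' then
        let p' := pvAQuote cs n '"' fuel (p + 1)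
        pvAAttr cs n fuel (if p' < n then p' + 1 else p')
      else if c = '\'' then
        let p' := pvAQuote cs n '\'' fuel (p + 1)
        pvAAttr cs n fuel (if p' < n then p' + 1 else p')
      else if c = '\n' then pvAAttr cs n fuel (p + 1)
      else pvAAttr cs n fuel (p + 1)
    else none

def skip_html_tag_py (text : String) (pos : Int) : Int :=
  let cs := text.toList
  let n : Int := cs.length
  let fuel := (n - pos).toNat + 1
  if pos ≥ n ∨ pvGetCh cs pos ≠ '<' then pos
  else
    let p0 := pos + 1
    let p1 := if p0 < n ∧ pvGetCh cs p0 = '/' then p0 + 1 else p0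
    if p1 ≥ n ∨ PySem.Chars.isalpha (pvGetCh cs p1) = false then pos
    else
      match pvAAttr cs n fuel (pvAName cs n fuel p1) with
      | some r => r
      | none => pos

-- ===== PORT B =====
-- Source B's single while loop carrying the DFA state; in state 3 a non-name character falls
-- through to the state-4 (attribute) handling of the same character, as in Source B
def pvBLoop (cs : List Char) (n : Int) (pos : Int) : Nat → Nat → Int → Int
  | 0, _, _ => pos
  | fuel + 1, state, p =>
    if p < n then
      let c := pvGetCh cs p
      match state with
      | 0 => if c ≠ '<' then pos else pvBLoop cs n pos fuel 1 (p + 1)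
      | 1 =>
          if c = '/' then pvBLoop cs n pos fuel 2 (p + 1)
          else if PySem.Chars.isalpha c then pvBLoop cs n pos fuel 3 (p + 1)
          else pos
      | 2 => if PySem.Chars.isalpha c then pvBLoop cs n pos fuel 3 (p + 1) else pos
      | 3 =>
          if PySem.Chars.isalnum c || c = '-' || c = '_' || c = ':' then
            pvBLoop cs n pos fuel 3 (p + 1)
          else
            if c = '>' then p + 1
            else if c = '"' then pvBLoop cs n pos fuel 5 (p + 1)
            else if c = '\'' then pvBLoop cs n pos fuel 6 (p + 1)
            else pvBLoop cs n pos fuel 4 (p + 1)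
      | 4 =>
          if c = '>' then p + 1
          else if c = '"' then pvBLoop cs n pos fuel 5 (p + 1)
          else if c = '\'' then pvBLoop cs n pos fuel 6 (p + 1)
          else pvBLoop cs n pos fuel 4 (p + 1)
      | 5 => if c = '"' then pvBLoop cs n pos fuel 4 (p + 1) else pvBLoop cs n pos fuel 5 (p + 1)
      | _ => if c = '\'' then pvBLoop cs n pos fuel 4 (p + 1) else pvBLoop cs n pos fuel 6 (p + 1)
    else pos

def skip_html_tag_py_alt (text : String) (pos : Int) : Int :=
  let cs := text.toList
  let n : Int := cs.length
  pvBLoop cs n pos ((n - pos).toNat + 1) 0 pos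

-- ===== PRECONDITION & SPEC =====
-- Pre_ excludes exactly the inputs where A raises IndexError: pos < -len(text)
-- (text[pos] is evaluated there and the negative index is out of range). B raises the same way.
def Pre_skip_html_tag_py (text : String) (pos : Int) : Prop := -(text.length : Int) ≤ pos
instance (text : String) (pos : Int) : Decidable (Pre_skip_html_tag_py text pos) := by
  unfold Pre_skip_html_tag_py; infer_instance

def pvWitness_skip_html_tag_py : String × Int := ("<a href=\"x>y\">", 0)

def Spec_skip_html_tag_py (text : String) (pos : Int) (out : Int) : Prop :=
  out = skip_html_tag_py_alt text pos
instance (text : String) (pos : Int) (out : Int) : Decidable (Spec_skip_html_tag_py text pos out) := by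
  unfold Spec_skip_html_tag_py; infer_instance

-- ===== CLAIM (what is proved, stated in full; the proofs are below) =====
def Claim_equal_skip_html_tag_py : Prop := ∀ (text : String) (pos : Int),
  Dom_skip_html_tag_py text pos → Pre_skip_html_tag_py text pos →
  Spec_skip_html_tag_py text pos (skip_html_tag_py text pos)

-- ===== LEMMAS AND PROOFS =====

theorem pv_alpha_namechar (c : Char) (h : PySem.Chars.isalpha c = true) :
    (PySem.Chars.isalnum c || c = '-' || c = '_' || c = ':') = true := by
  simp [PySem.Chars.isalpha, PySem.Chars.isalnum] at *
  tauto

theorem pvAQuote_ge (cs : List Char) (n : Int) (q : Char) :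
    ∀ (fuel : Nat) (p : Int), p ≤ pvAQuote cs n q fuel p := by
  intro fuel
  induction fuel with
  | zero => intro p; simp [pvAQuote]
  | succ f ih =>
    intro p
    simp only [pvAQuote]
    split_ifs with h1 h2
    · exact le_refl p
    · exact le_trans (by omega) (ih (p + 1))
    · exact le_refl p

theorem pvAName_ge (cs : List Char) (n : Int) :
    ∀ (fuel : Nat) (p : Int), p ≤ pvAName cs n fuel p := by
  intro fuel
  induction fuel with
  | zero => intro p; simp [pvAName]
  | succ f ih =>
    intro p
    simp only [pvAName]
    split_ifs with h1 h2
    · exact le_trans (by omega) (ih (p + 1))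
    · exact le_refl p
    · exact le_refl p

theorem pvAQuote_irrel (cs : List Char) (n : Int) (q : Char) :
    ∀ (f₁ f₂ : Nat) (p : Int), (n - p).toNat ≤ f₁ → (n - p).toNat ≤ f₂ →
      pvAQuote cs n q f₁ p = pvAQuote cs n q f₂ p := by
  intro f₁
  induction f₁ with
  | zero =>
    intro f₂ p h1 h2
    have hp : ¬ p < n := by omega
    cases f₂ <;> simp [pvAQuote, hp]
  | succ f ih =>
    intro f₂ p h1 h2
    by_cases hp : p < n
    · obtain ⟨g, rfl⟩ : ∃ g, f₂ = g + 1 := ⟨f₂ - 1, by omega⟩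
      simp only [pvAQuote, if_pos hp]
      split_ifs with hc
      · rfl
      · exact ih g (p + 1) (by omega) (by omega)
    · cases f₂ <;> simp [pvAQuote, hp]

theorem pvAName_irrel (cs : List Char) (n : Int) :
    ∀ (f₁ f₂ : Nat) (p : Int), (n - p).toNat ≤ f₁ → (n - p).toNat ≤ f₂ →
      pvAName cs n f₁ p = pvAName cs n f₂ p := by
  intro f₁
  induction f₁ with
  | zero =>
    intro f₂ p h1 h2
    have hp : ¬ p < n := by omega
    cases f₂ <;> simp [pvAName, hp]
  | succ f ih =>
    intro f₂ p h1 h2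
    by_cases hp : p < n
    · obtain ⟨g, rfl⟩ : ∃ g, f₂ = g + 1 := ⟨f₂ - 1, by omega⟩
      simp only [pvAName, if_pos hp]
      split_ifs with hc
      · exact ih g (p + 1) (by omega) (by omega)
      · rfl
    · cases f₂ <;> simp [pvAName, hp]

theorem pvAAttr_none (cs : List Char) (n : Int) :
    ∀ (fuel : Nat) (p : Int), ¬ p < n → pvAAttr cs n fuel p = none := by
  intro fuel p hp
  cases fuel <;> simp [pvAAttr, hp]

theorem pvAAttr_irrel (cs : List Char) (n : Int) :
    ∀ (f₁ f₂ : Nat) (p : Int), (n - p).toNat ≤ f₁ → (n - p).toNat ≤ f₂ →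
      pvAAttr cs n f₁ p = pvAAttr cs n f₂ p := by
  intro f₁
  induction f₁ with
  | zero =>
    intro f₂ p h1 h2
    have hp : ¬ p < n := by omega
    rw [pvAAttr_none cs n 0 p hp, pvAAttr_none cs n f₂ p hp]
  | succ f ih =>
    intro f₂ p h1 h2
    by_cases hp : p < n
    · obtain ⟨g, rfl⟩ : ∃ g, f₂ = g + 1 := ⟨f₂ - 1, by omega⟩
      simp only [pvAAttr, if_pos hp]
      by_cases hgt : pvGetCh cs p = '>'
      · simp only [if_pos hgt]
      · simp only [if_neg hgt]
        by_cases hdq : pvGetCh cs p = '"'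
        · simp only [if_pos hdq]
          rw [← pvAQuote_irrel cs n '"' f g (p + 1) (by omega) (by omega)]
          have hge := pvAQuote_ge cs n '"' f (p + 1)
          exact ih g _ (by split <;> omega) (by split <;> omega)
        · simp only [if_neg hdq]
          by_cases hsq : pvGetCh cs p = '\''
          · simp only [if_pos hsq]
            rw [← pvAQuote_irrel cs n '\'' f g (p + 1) (by omega) (by omega)]
            have hge := pvAQuote_ge cs n '\'' f (p + 1)
            exact ih g _ (by split <;> omega) (by split <;> omega)
          · simp only [if_neg hsq]
            by_cases hnl : pvGetCh cs p = '\n'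
            · simp only [if_pos hnl]
              exact ih g (p + 1) (by omega) (by omega)
            · simp only [if_neg hnl]
              exact ih g (p + 1) (by omega) (by omega)
    · rw [pvAAttr_none cs n (f + 1) p hp, pvAAttr_none cs n f₂ p hp]

theorem pvBLoop_stop (cs : List Char) (n pos : Int) (fuel state : Nat) (p : Int)
    (hp : ¬ p < n) : pvBLoop cs n pos fuel state p = pos := by
  cases fuel <;> simp [pvBLoop, hp]

set_option maxHeartbeats 1000000 in
theorem pvBLoop_irrel (cs : List Char) (n pos : Int) :
    ∀ (f₁ f₂ state : Nat) (p : Int), (n - p).toNat ≤ f₁ → (n - p).toNat ≤ f₂ →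
      pvBLoop cs n pos f₁ state p = pvBLoop cs n pos f₂ state p := by
  intro f₁
  induction f₁ with
  | zero =>
    intro f₂ state p h1 h2
    rw [pvBLoop_stop cs n pos 0 state p (by omega), pvBLoop_stop cs n pos f₂ state p (by omega)]
  | succ f ih =>
    intro f₂ state p h1 h2
    by_cases hp : p < n
    · obtain ⟨g, rfl⟩ : ∃ g, f₂ = g + 1 := ⟨f₂ - 1, by omega⟩
      simp only [pvBLoop, if_pos hp]
      rcases state with _ | _ | _ | _ | _ | _ | state <;>
        · split_ifs <;> first
            | rfl
            | exact ih g _ (p + 1) (by omega) (by omega)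
    · rw [pvBLoop_stop cs n pos (f + 1) state p hp, pvBLoop_stop cs n pos f₂ state p hp]

-- B in a quote state runs A's inner quote loop
theorem pvB_quote (cs : List Char) (n pos : Int) (q : Char) (st : Nat)
    (hq : q = '"' ∧ st = 5 ∨ q = '\'' ∧ st = 6) :
    ∀ (f : Nat) (p : Int), (n - p).toNat ≤ f →
      pvBLoop cs n pos f st p =
        (if pvAQuote cs n q f p < n then pvBLoop cs n pos f 4 (pvAQuote cs n q f p + 1)
         else pos) := by
  intro f
  induction f with
  | zero =>
    intro p h1
    have hp : ¬ p < n := by omega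
    simp only [pvAQuote]
    rw [if_neg hp, pvBLoop_stop cs n pos 0 st p hp]
  | succ f ih =>
    intro p h1
    by_cases hp : p < n
    · have hst : st = 5 ∨ st = 6 := by rcases hq with ⟨-, h⟩ | ⟨-, h⟩ <;> omega
      by_cases hc : pvGetCh cs p = q
      · have hqv : pvAQuote cs n q (f + 1) p = p := by simp [pvAQuote, hp, hc]
        rw [hqv, if_pos hp]
        have hb : pvBLoop cs n pos (f + 1) st p = pvBLoop cs n pos f 4 (p + 1) := by
          rcases hq with ⟨rfl, rfl⟩ | ⟨rfl, rfl⟩ <;> simp [pvBLoop, hp, hc]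
        rw [hb]
        exact pvBLoop_irrel cs n pos f (f + 1) 4 (p + 1) (by omega) (by omega)
      · have hqv : pvAQuote cs n q (f + 1) p = pvAQuote cs n q f (p + 1) := by
          simp [pvAQuote, hp, hc]
        have hb : pvBLoop cs n pos (f + 1) st p = pvBLoop cs n pos f st (p + 1) := by
          rcases hq with ⟨rfl, rfl⟩ | ⟨rfl, rfl⟩ <;> simp [pvBLoop, hp, hc]
        rw [hqv, hb, ih (p + 1) (by omega)]
        have hge := pvAQuote_ge cs n q f (p + 1)
        split_ifs with hlt
        · exact pvBLoop_irrel cs n pos f (f + 1) 4 _ (by omega) (by omega)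
        · rfl
    · have hqv : pvAQuote cs n q (f + 1) p = p := by simp [pvAQuote, hp]
      rw [hqv, if_neg hp, pvBLoop_stop cs n pos (f + 1) st p hp]

-- B's attribute state computes A's attribute loop (with "no '>'" mapped to pos)
theorem pvB_attr (cs : List Char) (n pos : Int) :
    ∀ (f : Nat) (p : Int), (n - p).toNat ≤ f →
      pvBLoop cs n pos f 4 p = (pvAAttr cs n f p).getD pos := by
  intro f
  induction f with
  | zero => intro p h1; simp [pvBLoop, pvAAttr]
  | succ f ih =>
    intro p h1
    by_cases hp : p < n
    · simp only [pvBLoop, pvAAttr, if_pos hp]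
      by_cases hgt : pvGetCh cs p = '>'
      · simp [hgt]
      · simp only [if_neg hgt]
        by_cases hdq : pvGetCh cs p = '"'
        · simp only [if_pos hdq]
          rw [pvB_quote cs n pos '"' 5 (Or.inl ⟨rfl, rfl⟩) f (p + 1) (by omega)]
          have hge := pvAQuote_ge cs n '"' f (p + 1)
          by_cases hlt : pvAQuote cs n '"' f (p + 1) < n
          · rw [if_pos hlt, if_pos hlt, ih _ (by omega)]
          · rw [if_neg hlt, if_neg hlt, pvAAttr_none cs n f _ hlt]
            rfl
        · simp only [if_neg hdq]
          by_cases hsq : pvGetCh cs p = '\''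
          · simp only [if_pos hsq]
            rw [pvB_quote cs n pos '\'' 6 (Or.inr ⟨rfl, rfl⟩) f (p + 1) (by omega)]
            have hge := pvAQuote_ge cs n '\'' f (p + 1)
            by_cases hlt : pvAQuote cs n '\'' f (p + 1) < n
            · rw [if_pos hlt, if_pos hlt, ih _ (by omega)]
            · rw [if_neg hlt, if_neg hlt, pvAAttr_none cs n f _ hlt]
              rfl
          · simp only [if_neg hsq]
            by_cases hnl : pvGetCh cs p = '\n'
            · simp only [if_pos hnl]
              exact ih (p + 1) (by omega)
            · simp only [if_neg hnl]
              exact ih (p + 1) (by omega)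
    · rw [pvBLoop_stop cs n pos (f + 1) 4 p hp, pvAAttr_none cs n (f + 1) p hp]
      rfl

-- B's name state runs A's tag-name loop, then continues in the attribute state
theorem pvB_name (cs : List Char) (n pos : Int) :
    ∀ (f : Nat) (p : Int), (n - p).toNat ≤ f →
      pvBLoop cs n pos f 3 p = pvBLoop cs n pos f 4 (pvAName cs n f p) := by
  intro f
  induction f with
  | zero => intro p h1; simp [pvBLoop, pvAName]
  | succ f ih =>
    intro p h1
    by_cases hp : p < n
    · by_cases hc : (PySem.Chars.isalnum (pvGetCh cs p) || pvGetCh cs p = '-'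
          || pvGetCh cs p = '_' || pvGetCh cs p = ':') = true
      · have hL : pvBLoop cs n pos (f + 1) 3 p = pvBLoop cs n pos f 3 (p + 1) := by
          simp [pvBLoop, hp, hc]
        have hN : pvAName cs n (f + 1) p = pvAName cs n f (p + 1) := by
          simp [pvAName, hp, hc]
        rw [hL, hN, ih (p + 1) (by omega)]
        have hge := pvAName_ge cs n f (p + 1)
        exact pvBLoop_irrel cs n pos f (f + 1) 4 _ (by omega) (by omega)
      · have hN : pvAName cs n (f + 1) p = p := by simp [pvAName, hp, hc]
        rw [hN]
        simp only [pvBLoop, if_pos hp]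
        simp [hc]
    · rw [pvBLoop_stop cs n pos (f + 1) 3 p hp, pvAName, if_neg hp,
        pvBLoop_stop cs n pos (f + 1) 4 p hp]

theorem pvAName_step (cs : List Char) (n : Int) (f : Nat) (p : Int) (h : p < n)
    (ha : PySem.Chars.isalpha (pvGetCh cs p) = true) :
    pvAName cs n (f + 1) p = pvAName cs n f (p + 1) := by
  simp [pvAName, h, pv_alpha_namechar _ ha]

-- ===== VERDICT (by name: the statement is the Claim_ definition above) =====
theorem skip_html_tag_py_spec : Claim_equal_skip_html_tag_py := by
  intro text pos _ _
  unfold Spec_skip_html_tag_py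
  dsimp only [skip_html_tag_py, skip_html_tag_py_alt]
  generalize text.toList = cs
  by_cases h0 : pos ≥ (cs.length : Int) ∨ pvGetCh cs pos ≠ '<'
  · rw [if_pos h0]
    by_cases hlt : pos < (cs.length : Int)
    · rcases h0 with h0 | h0
      · omega
      · simp [pvBLoop, hlt, h0]
    · rw [pvBLoop_stop cs (cs.length : Int) pos _ 0 pos hlt]
  · push_neg at h0
    obtain ⟨hlt, hc0⟩ := h0
    rw [if_neg (by push_neg; exact ⟨hlt, hc0⟩)]
    conv_rhs => rw [pvBLoop]; simp [hlt, hc0]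
    by_cases h1 : pos + 1 < (cs.length : Int)
    · obtain ⟨g, hg⟩ : ∃ g, ((cs.length : Int) - pos).toNat = g + 1 := ⟨((cs.length : Int) - pos).toNat - 1, by omega⟩
      conv_rhs => rw [hg]
      by_cases hsl : pvGetCh cs (pos + 1) = '/'
      · simp only [if_pos (⟨h1, hsl⟩ : pos + 1 < (cs.length : Int) ∧ pvGetCh cs (pos + 1) = '/')]
        conv_rhs => rw [pvBLoop]; simp [h1, hsl]
        by_cases h2 : pos + 1 + 1 < (cs.length : Int)
        · obtain ⟨g₂, hg₂⟩ : ∃ g₂, g = g₂ + 1 := ⟨g - 1, by omega⟩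
          conv_rhs => rw [hg₂]
          conv_rhs => rw [pvBLoop]; simp [h2]
          by_cases ha : PySem.Chars.isalpha (pvGetCh cs (pos + 1 + 1)) = true
          · rw [if_neg (show ¬(pos + 1 + 1 ≥ (cs.length : Int) ∨
                PySem.Chars.isalpha (pvGetCh cs (pos + 1 + 1)) = false) from by
                push_neg; exact ⟨by omega, by simp [ha]⟩)]
            conv_rhs => rw [if_pos ha]
            rw [pvB_name cs (cs.length : Int) pos g₂ (pos + 1 + 1 + 1) (by omega),
              pvB_attr cs (cs.length : Int) pos g₂ _
                (by have := pvAName_ge cs (cs.length : Int) g₂ (pos + 1 + 1 + 1); omega),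
              pvAName_step cs (cs.length : Int) _ (pos + 1 + 1) h2 ha]
            have hnm : pvAName cs (cs.length : Int) ((cs.length : Int) - pos).toNat (pos + 1 + 1 + 1) =
                pvAName cs (cs.length : Int) g₂ (pos + 1 + 1 + 1) :=
              pvAName_irrel cs (cs.length : Int) _ g₂ _ (by omega) (by omega)
            rw [hnm]
            have hat : pvAAttr cs (cs.length : Int) (((cs.length : Int) - pos).toNat + 1)
                  (pvAName cs (cs.length : Int) g₂ (pos + 1 + 1 + 1)) =
                pvAAttr cs (cs.length : Int) g₂
                  (pvAName cs (cs.length : Int) g₂ (pos + 1 + 1 + 1)) :=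
              pvAAttr_irrel cs (cs.length : Int) _ g₂ _
                (by have := pvAName_ge cs (cs.length : Int) g₂ (pos + 1 + 1 + 1); omega)
                (by have := pvAName_ge cs (cs.length : Int) g₂ (pos + 1 + 1 + 1); omega)
            rw [hat]
            cases pvAAttr cs (cs.length : Int) g₂
              (pvAName cs (cs.length : Int) g₂ (pos + 1 + 1 + 1)) <;> rfl
          · rw [if_pos (show pos + 1 + 1 ≥ (cs.length : Int) ∨
                PySem.Chars.isalpha (pvGetCh cs (pos + 1 + 1)) = false from
                  Or.inr (by simpa using ha))]
            conv_rhs => rw [if_neg ha]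
        · rw [if_pos (show pos + 1 + 1 ≥ (cs.length : Int) ∨
              PySem.Chars.isalpha (pvGetCh cs (pos + 1 + 1)) = false from Or.inl (by omega)),
            pvBLoop_stop cs (cs.length : Int) pos g 2 (pos + 1 + 1) (by omega)]
      · simp only [if_neg (show ¬(pos + 1 < (cs.length : Int) ∧ pvGetCh cs (pos + 1) = '/') from
          fun hh => hsl hh.2)]
        conv_rhs => rw [pvBLoop]; simp [h1, hsl]
        by_cases ha : PySem.Chars.isalpha (pvGetCh cs (pos + 1)) = true
        · rw [if_neg (show ¬(pos + 1 ≥ (cs.length : Int) ∨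
              PySem.Chars.isalpha (pvGetCh cs (pos + 1)) = false) from by
              push_neg; exact ⟨by omega, by simp [ha]⟩)]
          conv_rhs => rw [if_pos ha]
          rw [pvB_name cs (cs.length : Int) pos g (pos + 1 + 1) (by omega),
            pvB_attr cs (cs.length : Int) pos g _
              (by have := pvAName_ge cs (cs.length : Int) g (pos + 1 + 1); omega),
            pvAName_step cs (cs.length : Int) _ (pos + 1) h1 ha]
          have hnm : pvAName cs (cs.length : Int) ((cs.length : Int) - pos).toNat (pos + 1 + 1) =
              pvAName cs (cs.length : Int) g (pos + 1 + 1) :=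
            pvAName_irrel cs (cs.length : Int) _ g _ (by omega) (by omega)
          rw [hnm]
          have hat : pvAAttr cs (cs.length : Int) (((cs.length : Int) - pos).toNat + 1)
                (pvAName cs (cs.length : Int) g (pos + 1 + 1)) =
              pvAAttr cs (cs.length : Int) g
                (pvAName cs (cs.length : Int) g (pos + 1 + 1)) :=
            pvAAttr_irrel cs (cs.length : Int) _ g _
              (by have := pvAName_ge cs (cs.length : Int) g (pos + 1 + 1); omega)
              (by have := pvAName_ge cs (cs.length : Int) g (pos + 1 + 1); omega)
          rw [hat]
          cases pvAAttr cs (cs.length : Int) g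
            (pvAName cs (cs.length : Int) g (pos + 1 + 1)) <;> rfl
        · rw [if_pos (show pos + 1 ≥ (cs.length : Int) ∨
            PySem.Chars.isalpha (pvGetCh cs (pos + 1)) = false from Or.inr (by simpa using ha))]
          conv_rhs => rw [if_neg ha]
    · simp only [if_neg (show ¬(pos + 1 < (cs.length : Int) ∧ pvGetCh cs (pos + 1) = '/') from
        fun hh => absurd hh.1 h1)]
      rw [if_pos (show pos + 1 ≥ (cs.length : Int) ∨
          PySem.Chars.isalpha (pvGetCh cs (pos + 1)) = false from Or.inl (by omega)),
        pvBLoop_stop cs (cs.length : Int) pos _ 1 (pos + 1) (by omega)]
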